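-- pv_equiv track=rewrite | github.com/sunkyuj/ps | 프로그래머스/3/68646. 풍선 터트리기/풍선 터트리기.py | solution
-- ===== SOURCE A (Python) =====
-- def solution(a):
--     answer = 0
--     # 두개 중 큰거 터친다(작은거 딱한번 가능), 붙인다 하나 남을때까지 반복
--
--     # a 100만, 각 수는 +-10억, 모두 다름
--
--     asort = sorted(a)
--     n = len(a)
--     left_under = [0]*n
--     right_under = [0]*n
--
--
--     # 오른쪽 한번 갈거
--     left_min_idx = 0
--     for i in range(1, n):
--         if a[i] > a[left_min_idx]: # 지금 놈이 왼쪽 최소보다 크면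
--             left_under[i] += 1 # 지금 놈의 left under 늘림
--         else:
--             right_under[left_min_idx] += 1
--             left_min_idx = i
--
--     # 왼쪽 한번 갈거
--     right_min_idx = n-1
--     for i in range(n-2, -1, -1):
--         if a[i] > a[right_min_idx]:
--             right_under[i] += 1
--         else:
--             left_under[right_min_idx] += 1
--             right_min_idx = i
--
--     total = [ left_under[i] != 1 or right_under[i] != 1 for i in range(n)]
--
--     # 최후에 남기는게 가능한 풍선 개수
--     return sum(total)
-- ===== SOURCE B (Python) =====
-- def solution(a):
--     # A balloon can be the last survivor iff its value is the minimum of its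
--     # prefix or of its suffix: build both running-minimum arrays and count.
--     n = len(a)
--     pmin = []
--     m = None
--     for x in a:
--         m = x if m is None or x < m else m
--         pmin.append(m)
--     srev = []
--     m = None
--     for x in reversed(a):
--         m = x if m is None or x < m else m
--         srev.append(m)
--     smin = srev[::-1]
--     return sum(1 for i in range(n) if a[i] == pmin[i] or a[i] == smin[i])
-- ===== Notes on version B (the rewrite author's own statement) =====
-- stated objective: simpler
-- what changed: Replaces A's unused sort and its two stateful min-index-tracking loops that increment per-index under-count arrays (then a read-back pass) by two running-minimum scans and a direct count of indices that are a prefix- or suffix-minimum; Pre_ excludes lists with duplicate values, on which A's tie-handling by its stateful min-index updates is accidental (the problem A solves guarantees all values distinct, as A's own comment states).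
-- outside the precondition, e.g. on solution([0, 0, 0]): A returns 2, B returns 3
import Mathlib
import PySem

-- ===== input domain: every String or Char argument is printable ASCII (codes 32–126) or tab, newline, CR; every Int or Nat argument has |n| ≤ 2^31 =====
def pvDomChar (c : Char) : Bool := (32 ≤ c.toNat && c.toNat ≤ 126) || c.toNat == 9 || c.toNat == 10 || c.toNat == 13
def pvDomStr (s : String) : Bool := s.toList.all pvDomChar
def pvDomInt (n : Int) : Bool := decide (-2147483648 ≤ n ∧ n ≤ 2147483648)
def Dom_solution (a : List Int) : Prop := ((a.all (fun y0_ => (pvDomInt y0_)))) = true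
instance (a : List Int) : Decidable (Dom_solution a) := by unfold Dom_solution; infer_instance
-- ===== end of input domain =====

-- B replaces A's unused sort and stateful min-index loops by two running-minimum
-- scans and a direct prefix/suffix-minimum count; equivalence is claimed on
-- duplicate-free lists (Pre_), the domain A's problem guarantees.

-- ===== PORT A =====
-- body of A's first loop (ascending; tracks left_min_idx in s.2.2)
def pvStep1 (b : List Int) (s : List Int × List Int × Int) (i : Int) : List Int × List Int × Int :=
  if PySem.List.pyGetD b i 0 > PySem.List.pyGetD b s.2.2 0 then
    (PySem.List.pySetD s.1 i (PySem.List.pyGetD s.1 i 0 + 1), s.2.1, s.2.2)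
  else
    (s.1, PySem.List.pySetD s.2.1 s.2.2 (PySem.List.pyGetD s.2.1 s.2.2 0 + 1), i)

-- body of A's second loop (descending; tracks right_min_idx in s.2.2)
def pvStep2 (b : List Int) (s : List Int × List Int × Int) (i : Int) : List Int × List Int × Int :=
  if PySem.List.pyGetD b i 0 > PySem.List.pyGetD b s.2.2 0 then
    (s.1, PySem.List.pySetD s.2.1 i (PySem.List.pyGetD s.2.1 i 0 + 1), s.2.2)
  else
    (PySem.List.pySetD s.1 s.2.2 (PySem.List.pyGetD s.1 s.2.2 0 + 1), s.2.1, i)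

-- all indices used are in range, so pyGetD/pySetD are exact for Python's a[i]
def solution (a : List Int) : Int :=
  let _asort := PySem.List.sorted a (fun x => x) false
  let n : Int := PySem.List.len a
  let left_under := PySem.List.pyRepeat [(0 : Int)] n
  let right_under := PySem.List.pyRepeat [(0 : Int)] n
  let s1 := (PySem.List.pyRange 1 n 1).foldl (pvStep1 a) (left_under, right_under, 0)
  let s2 := (PySem.List.pyRange (n - 2) (-1) (-1)).foldl (pvStep2 a) (s1.1, s1.2.1, n - 1)
  let total := (PySem.List.pyRange 0 n 1).map (fun i =>
    !(PySem.List.pyGetD s2.1 i 0 == 1) || !(PySem.List.pyGetD s2.2.1 i 0 == 1))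
  total.foldl (fun acc bl => acc + (if bl then 1 else 0)) 0

-- ===== PORT B =====
-- running-minimum scan ('m = x if m is None or x < m else m; out.append(m)')
def pvScan (s : Option Int × List Int) (x : Int) : Option Int × List Int :=
  let m := match s.1 with
    | none => x
    | some m0 => if x < m0 then x else m0
  (some m, s.2 ++ [m])

def solution_alt (a : List Int) : Int :=
  let n : Int := PySem.List.len a
  let pmin := (a.foldl pvScan (none, [])).2
  let srev := (a.reverse.foldl pvScan (none, [])).2
  let smin := (PySem.List.slice? srev none none (-1)).getD []
  (PySem.List.pyRange 0 n 1).foldl (fun count i =>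
    count + (if PySem.List.pyGetD a i 0 = PySem.List.pyGetD pmin i 0 ∨
               PySem.List.pyGetD a i 0 = PySem.List.pyGetD smin i 0 then 1 else 0)) 0

-- ===== PRECONDITION & SPEC =====
-- Pre_ excludes lists with duplicate values, on which A's tie-handling by its
-- stateful min-index updates is accidental (the problem A solves guarantees
-- all balloon values distinct, as A's own comment states).
def Pre_solution (a : List Int) : Prop := a.Nodup
instance (a : List Int) : Decidable (Pre_solution a) := by unfold Pre_solution; infer_instance
def pvWitness_solution : List Int := [3, 1, 2]

def Spec_solution (a : List Int) (out : Int) : Prop := out = solution_alt a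
instance (a : List Int) (out : Int) : Decidable (Spec_solution a out) := by unfold Spec_solution; infer_instance

-- ===== CLAIM (what is proved, stated in full; the proofs are below) =====
def Claim_equal_solution : Prop := ∀ (a : List Int), Dom_solution a → Pre_solution a → Spec_solution a (solution a)

-- ===== LEMMAS AND PROOFS =====

-- getD-based index read (Nat index)
def pvG (b : List Int) (j : Nat) : Int := b.getD j 0
-- prefix minimum of b[0..j]
def pvPM (b : List Int) : Nat → Int
  | 0 => pvG b 0
  | k+1 => min (pvPM b k) (pvG b (k+1))
-- j is a (≤-sense) prefix-minimum position
abbrev pvPF (b : List Int) (j : Nat) : Prop := pvG b j = pvPM b j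
-- index held by left_min_idx after processing 1..k
def pvM (b : List Int) : Nat → Nat
  | 0 => 0
  | k+1 => if pvPM b k < pvG b (k+1) then pvM b k else k+1
-- pointwise add f over positions of u
def pvAdd (u : List Int) (f : Nat → Int) : List Int :=
  (List.range u.length).map (fun j => u.getD j 0 + f j)

theorem pvAdd_length (u : List Int) (f : Nat → Int) : (pvAdd u f).length = u.length := by
  simp [pvAdd]

theorem pvAdd_getD (u : List Int) (f : Nat → Int) {j : Nat} (h : j < u.length) :
    (pvAdd u f).getD j 0 = u.getD j 0 + f j := by
  simp [pvAdd, List.getD_eq_getElem?_getD, h]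

theorem pvAdd_zero (u : List Int) (f : Nat → Int) (h : ∀ j, f j = 0) : pvAdd u f = u := by
  apply List.ext_getElem (by simp [pvAdd])
  intro i h1 h2
  simp [pvAdd, h, List.getD_eq_getElem?_getD, List.getElem?_eq_getElem h2]

theorem pvPM_le (b : List Int) {i k : Nat} (h : i ≤ k) : pvPM b k ≤ pvG b i := by
  induction k with
  | zero => have : i = 0 := by omega
            subst this; simp [pvPM]
  | succ k ih =>
    rcases Nat.lt_or_ge i (k+1) with hi | hi
    · exact le_trans (by simp [pvPM]) (ih (by omega))
    · have : i = k+1 := by omega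
      subst this; simp [pvPM]

theorem pvPM_anti (b : List Int) {j k : Nat} (h : j ≤ k) : pvPM b k ≤ pvPM b j := by
  induction k with
  | zero => have : j = 0 := by omega
            subst this; simp
  | succ k ih =>
    rcases Nat.lt_or_ge j (k+1) with hj | hj
    · exact le_trans (by simp [pvPM]) (ih (by omega))
    · have : j = k+1 := by omega
      subst this; simp

theorem pvM_le (b : List Int) (k : Nat) : pvM b k ≤ k := by
  induction k with
  | zero => simp [pvM]
  | succ k ih => unfold pvM; split <;> omega

theorem pvG_pvM (b : List Int) (k : Nat) : pvG b (pvM b k) = pvPM b k := by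
  induction k with
  | zero => simp [pvM, pvPM]
  | succ k ih =>
    unfold pvM
    split
    · next hlt => rw [ih]; simp [pvPM]; omega
    · next hge => simp [pvPM]; omega

theorem pvPF_pvM (b : List Int) (k : Nat) : pvPF b (pvM b k) := by
  have h1 := pvPM_anti b (pvM_le b k)
  have h2 := pvPM_le b (le_refl (pvM b k))
  have h3 := pvG_pvM b k
  unfold pvPF
  omega

theorem pvPF_succ_iff (b : List Int) (k : Nat) : pvPF b (k+1) ↔ pvG b (k+1) ≤ pvPM b k := by
  simp only [pvPF, pvPM]
  omega

theorem pvM_max (b : List Int) {j k : Nat} (hj : j ≤ k) (hp : pvPF b j) : j ≤ pvM b k := by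
  induction k with
  | zero => omega
  | succ k ih =>
    unfold pvM
    split
    · next hlt =>
      rcases Nat.lt_or_ge j (k+1) with h | h
      · exact ih (by omega)
      · exfalso
        have : j = k+1 := by omega
        subst this
        have := (pvPF_succ_iff b k).mp hp
        omega
    · omega

theorem pvAdd_getElem (u : List Int) (f : Nat → Int) {i : Nat} (h : i < (pvAdd u f).length) :
    (pvAdd u f)[i] = u.getD i 0 + f i := by
  simp [pvAdd]

theorem pvAdd_congr (u : List Int) (f g : Nat → Int) (h : ∀ j, f j = g j) :
    pvAdd u f = pvAdd u g := congrArg (pvAdd u) (funext h)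

theorem pvSet_pvAdd (u : List Int) (f : Nat → Int) {t : Nat} (ht : t < u.length) (g : Nat → Int)
    (hgt : g t = f t + 1) (hg : ∀ j, j ≠ t → g j = f j) :
    (pvAdd u f).set t ((pvAdd u f).getD t 0 + 1) = pvAdd u g := by
  apply List.ext_getElem (by simp [pvAdd])
  intro i h1 h2
  have hi : i < u.length := by simpa [pvAdd] using h2
  rw [List.getElem_set]
  by_cases hit : t = i
  · subst hit
    rw [if_pos rfl, pvAdd_getElem _ _ h2, pvAdd_getD _ _ hi, hgt]
    ring
  · rw [if_neg hit, pvAdd_getElem _ _ (by simpa [pvAdd] using hi),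
        pvAdd_getElem _ _ h2, hg i (fun h => hit h.symm)]

-- characterization of A's first loop
theorem pvLoop1_char (b u v : List Int) (hu : u.length = b.length) (hv : v.length = b.length)
    (k : Nat) (hk : k < b.length) :
    (PySem.List.pyRange 1 ((k : Int) + 1) 1).foldl (pvStep1 b) (u, v, 0) =
      (pvAdd u (fun j => if j ≤ k ∧ ¬ pvPF b j then 1 else 0),
       pvAdd v (fun j => if j ≤ k ∧ pvPF b j ∧ j ≠ pvM b k then 1 else 0),
       ((pvM b k : Nat) : Int)) := by
  induction k with
  | zero =>
    rw [show ((0:Nat):Int) + 1 = 1 by norm_num]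
    rw [PySem.List.pyRange_one_eq_nil (le_refl 1)]
    simp only [List.foldl_nil]
    have hufun : ∀ j, (if j ≤ 0 ∧ ¬ pvPF b j then (1:Int) else 0) = 0 := by
      intro j
      cases j with
      | zero => simp [pvPF, pvPM]
      | succ j => simp
    have hvfun : ∀ j, (if j ≤ 0 ∧ pvPF b j ∧ j ≠ pvM b 0 then (1:Int) else 0) = 0 := by
      intro j
      cases j with
      | zero => simp [pvM]
      | succ j => simp
    rw [pvAdd_zero u _ hufun, pvAdd_zero v _ hvfun]
    simp [pvM]
  | succ k ih =>
    have hk' : k < b.length := by omega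
    have hkc : ((k+1 : Nat) : Int) = ((k : Nat) : Int) + 1 := by push_cast; ring
    rw [show ((k+1 : Nat) : Int) + 1 = (((k : Nat) : Int) + 1) + 1 by rw [hkc]]
    rw [PySem.List.pyRange_one_succ_right (by omega : (1:Int) ≤ ((k:Nat):Int) + 1)]
    rw [List.foldl_append, ih hk']
    simp only [List.foldl_cons, List.foldl_nil]
    unfold pvStep1
    simp only
    have hg1 : PySem.List.pyGetD b (((k:Nat):Int)+1) 0 = pvG b (k+1) := by
      rw [← hkc, PySem.List.pyGetD_natCast]; rfl
    have hg2 : PySem.List.pyGetD b ((pvM b k : Nat) : Int) 0 = pvPM b k := by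
      rw [PySem.List.pyGetD_natCast]; exact pvG_pvM b k
    rw [hg1, hg2]
    split
    · next hcond =>
      have hM : pvM b (k+1) = pvM b k := by
        rw [show pvM b (k+1) = if pvPM b k < pvG b (k+1) then pvM b k else k+1 from rfl,
           if_pos hcond]
      have hnpf : ¬ pvPF b (k+1) := by
        rw [pvPF_succ_iff]; omega
      rw [hM]
      refine Prod.ext ?_ (Prod.ext ?_ rfl)
      · rw [← hkc, PySem.List.pySetD_natCast, PySem.List.pyGetD_natCast]
        refine pvSet_pvAdd u _ (by omega) _ ?_ ?_
        · rw [if_pos ⟨le_refl _, hnpf⟩, if_neg (by omega : ¬ (k+1 ≤ k ∧ ¬ pvPF b (k+1)))]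
          ring
        · intro j hj
          by_cases h1 : j ≤ k
          · exact (if_congr (by constructor <;> (rintro ⟨_, h⟩; exact ⟨by omega, h⟩)) rfl rfl).symm
          · rw [if_neg (by omega), if_neg (by omega)]
      · refine pvAdd_congr v _ _ (fun j => ?_)
        by_cases hj : j = k+1
        · subst hj
          rw [if_neg (by omega), if_neg (fun h => hnpf h.2.1)]
        · by_cases h1 : j ≤ k
          · exact if_congr (by constructor <;> (rintro ⟨_, h⟩; exact ⟨by omega, h⟩)) rfl rfl
          · rw [if_neg (by omega), if_neg (by omega)]
    · next hcond =>
      have hle : pvG b (k+1) ≤ pvPM b k := by omega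
      have hM : pvM b (k+1) = k+1 := by
        rw [show pvM b (k+1) = if pvPM b k < pvG b (k+1) then pvM b k else k+1 from rfl,
           if_neg (by omega)]
      have hpf : pvPF b (k+1) := (pvPF_succ_iff b k).mpr hle
      have hMle : pvM b k ≤ k := pvM_le b k
      rw [hM]
      refine Prod.ext ?_ (Prod.ext ?_ ?_)
      · refine pvAdd_congr u _ _ (fun j => ?_)
        by_cases hj : j = k+1
        · subst hj
          rw [if_neg (by omega), if_neg (fun h => h.2 hpf)]
        · by_cases h1 : j ≤ k
          · exact if_congr (by constructor <;> (rintro ⟨_, h⟩; exact ⟨by omega, h⟩)) rfl rfl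
          · rw [if_neg (by omega), if_neg (by omega)]
      · rw [PySem.List.pySetD_natCast, PySem.List.pyGetD_natCast]
        refine pvSet_pvAdd v _ (by omega) _ ?_ ?_
        · rw [if_pos ⟨by omega, pvPF_pvM b k, by omega⟩,
             if_neg (by simp : ¬ (pvM b k ≤ k ∧ pvPF b (pvM b k) ∧ pvM b k ≠ pvM b k))]
          ring
        · intro j hj
          by_cases hj1 : j = k+1
          · subst hj1
            rw [if_neg (by omega), if_neg (by omega)]
          · by_cases h1 : j ≤ k
            · exact if_congr (by
                constructor
                · rintro ⟨_, h2, _⟩; exact ⟨by omega, h2, by omega⟩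
                · rintro ⟨_, h2, _⟩; exact ⟨by omega, h2, by omega⟩) rfl rfl
            · rw [if_neg (by omega), if_neg (by omega)]
      · rw [hkc]

-- mirror transform for the second loop
def pvPhi (n : Nat) (s : List Int × List Int × Int) : List Int × List Int × Int :=
  (s.2.1.reverse, s.1.reverse, (n : Int) - 1 - s.2.2)

theorem pvPhi_phi (n : Nat) (s : List Int × List Int × Int) : pvPhi n (pvPhi n s) = s := by
  obtain ⟨x, y, m⟩ := s
  simp [pvPhi]

theorem pvSet_reverse (xs : List Int) {j : Nat} (h : j < xs.length) (v : Int) :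
    (xs.set j v).reverse = xs.reverse.set (xs.length - 1 - j) v := by
  apply List.ext_getElem (by simp)
  intro i h1 h2
  have hi : i < xs.length := by simpa using h1
  simp only [List.getElem_reverse, List.length_set, List.length_reverse, List.getElem_set]
  by_cases hij : j = xs.length - 1 - i
  · rw [if_pos hij, if_pos (by omega)]
  · rw [if_neg hij, if_neg (by omega : ¬ xs.length - 1 - j = i)]

theorem pvGetD_reverse (xs : List Int) {j : Nat} (h : j < xs.length) :
    xs.reverse.getD (xs.length - 1 - j) 0 = xs.getD j 0 := by
  have h1 : xs.length - 1 - j < xs.reverse.length := by simp; omega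
  rw [List.getD_eq_getElem _ _ h1, List.getD_eq_getElem _ _ h, List.getElem_reverse]
  congr 1
  omega

theorem pvConj (b : List Int) (lu ru : List Int) (rmi i : Int)
    (hlu : lu.length = b.length) (hru : ru.length = b.length)
    (hi0 : 0 ≤ i) (hi1 : i < (b.length : Int)) (hr0 : 0 ≤ rmi) (hr1 : rmi < (b.length : Int)) :
    pvPhi b.length (pvStep2 b (lu, ru, rmi) i) =
      pvStep1 b.reverse (pvPhi b.length (lu, ru, rmi)) ((b.length : Int) - 1 - i) := by
  obtain ⟨j, rfl⟩ : ∃ j : Nat, i = (j : Int) := ⟨i.toNat, (Int.toNat_of_nonneg hi0).symm⟩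
  obtain ⟨r, rfl⟩ : ∃ r : Nat, rmi = (r : Int) := ⟨rmi.toNat, (Int.toNat_of_nonneg hr0).symm⟩
  have hjn : j < b.length := by omega
  have hrn : r < b.length := by omega
  have grev : ∀ (xs : List Int) (t : Nat), xs.length = b.length → t < b.length →
      xs.reverse.getD (b.length - 1 - t) 0 = xs.getD t 0 := by
    intro xs t hx ht
    have h := pvGetD_reverse xs (j := t) (by omega)
    rw [hx] at h
    exact h
  have srev : ∀ (xs : List Int) (t : Nat) (v : Int), xs.length = b.length → t < b.length →
      (xs.set t v).reverse = xs.reverse.set (b.length - 1 - t) v := by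
    intro xs t v hx ht
    have h := pvSet_reverse xs (j := t) (by omega) v
    rw [hx] at h
    exact h
  unfold pvStep2 pvStep1 pvPhi
  dsimp only
  rw [show (b.length : Int) - 1 - (j : Int) = ((b.length - 1 - j : Nat) : Int) by omega,
      show (b.length : Int) - 1 - (r : Nat) = ((b.length - 1 - r : Nat) : Int) by omega]
  simp only [PySem.List.pyGetD_natCast, PySem.List.pySetD_natCast]
  rw [grev b j rfl hjn, grev b r rfl hrn, grev ru j hru hjn, grev lu r hlu hrn]
  by_cases hc : b.getD j 0 > b.getD r 0
  · rw [if_pos hc, if_pos hc]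
    dsimp only
    rw [srev ru j _ hru hjn]
    refine Prod.ext rfl (Prod.ext rfl ?_)
    dsimp only
    omega
  · rw [if_neg hc, if_neg hc]
    dsimp only
    rw [srev lu r _ hlu hrn]
    refine Prod.ext rfl (Prod.ext rfl ?_)
    dsimp only
    omega

theorem pvStep2_len_fst (b : List Int) (s : List Int × List Int × Int) (i : Int) :
    (pvStep2 b s i).1.length = s.1.length := by
  unfold pvStep2; split <;> simp

theorem pvStep2_rmi (b : List Int) (s : List Int × List Int × Int) (i : Int) :
    (pvStep2 b s i).2.2 = s.2.2 ∨ (pvStep2 b s i).2.2 = i := by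
  unfold pvStep2; split <;> simp

theorem pvStep2_len_snd (b : List Int) (s : List Int × List Int × Int) (i : Int) :
    (pvStep2 b s i).2.1.length = s.2.1.length := by
  unfold pvStep2; split <;> simp

theorem pvFoldCommute (b : List Int) (L : List Int)
    (hL : ∀ i ∈ L, 0 ≤ i ∧ i ≤ (b.length : Int) - 2) :
    ∀ (s : List Int × List Int × Int), s.1.length = b.length → s.2.1.length = b.length →
      0 ≤ s.2.2 → s.2.2 < (b.length : Int) →
    pvPhi b.length (L.foldl (pvStep2 b) s) =
      (L.map (fun i => (b.length : Int) - 1 - i)).foldl (pvStep1 b.reverse) (pvPhi b.length s) := by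
  induction L with
  | nil => intro s _ _ _ _; simp
  | cons i L ih =>
    intro s h1 h2 h3 h4
    have hi := hL i List.mem_cons_self
    simp only [List.foldl_cons, List.map_cons]
    rw [← pvConj b s.1 s.2.1 s.2.2 i h1 h2 hi.1 (by omega) h3 h4]
    refine ih (fun x hx => hL x (List.mem_cons_of_mem _ hx)) _ ?_ ?_ ?_ ?_
    · rw [pvStep2_len_fst]; exact h1
    · rw [pvStep2_len_snd]; exact h2
    · rcases pvStep2_rmi b (s.1, s.2.1, s.2.2) i with h | h <;> rw [h] <;> omega
    · rcases pvStep2_rmi b (s.1, s.2.1, s.2.2) i with h | h <;> rw [h] <;> omega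

theorem pvRangeMap (n : Nat) :
    (PySem.List.pyRange ((n : Int) - 2) (-1) (-1)).map (fun i => (n : Int) - 1 - i) =
      PySem.List.pyRange 1 (n : Int) 1 := by
  rw [PySem.List.pyRange_neg_one, PySem.List.pyRange_one, List.map_map]
  have he : ((n : Int) - 2 - (-1)).toNat = ((n : Int) - 1).toNat := by omega
  rw [he]
  apply List.map_congr_left
  intro k _
  simp only [Function.comp_apply]
  ring

theorem pvAdd_reverse (u : List Int) (f : Nat → Int) :
    (pvAdd u.reverse f).reverse = pvAdd u (fun j => f (u.length - 1 - j)) := by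
  apply List.ext_getElem (by simp [pvAdd])
  intro i h1 h2
  have hlen : (pvAdd u.reverse f).length = u.length := by simp [pvAdd]
  have hi : i < u.length := by simpa [pvAdd] using h2
  rw [List.getElem_reverse]
  have h3 : (pvAdd u.reverse f).length - 1 - i < (pvAdd u.reverse f).length := by
    rw [hlen]; omega
  rw [← List.getD_eq_getElem _ 0 h3, ← List.getD_eq_getElem _ 0 h2, hlen]
  rw [pvAdd_getD _ _ (by simp; omega), pvAdd_getD _ _ hi]
  rw [pvGetD_reverse u hi]

theorem pvAdd_comp (u : List Int) (f g : Nat → Int) :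
    pvAdd (pvAdd u f) g = pvAdd u (fun j => f j + g j) := by
  apply List.ext_getElem (by simp [pvAdd])
  intro i h1 h2
  have hi : i < u.length := by simpa [pvAdd] using h2
  have h2' : i < (pvAdd (pvAdd u f) g).length := by simpa [pvAdd] using hi
  rw [← List.getD_eq_getElem _ 0 h2', ← List.getD_eq_getElem _ 0 h2]
  rw [pvAdd_getD _ _ (by rw [pvAdd_length]; exact hi), pvAdd_getD _ _ hi, pvAdd_getD _ _ hi]
  ring

theorem pvG_append (c : List Int) (x : Int) {j : Nat} (h : j < c.length) :
    pvG (c ++ [x]) j = pvG c j := by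
  unfold pvG
  rw [List.getD_eq_getElem?_getD, List.getD_eq_getElem?_getD, List.getElem?_append_left h]

theorem pvG_append_self (c : List Int) (x : Int) : pvG (c ++ [x]) c.length = x := by
  unfold pvG
  rw [List.getD_eq_getElem?_getD, List.getElem?_concat_length]
  rfl

theorem pvPM_append (c : List Int) (x : Int) {j : Nat} (h : j < c.length) :
    pvPM (c ++ [x]) j = pvPM c j := by
  induction j with
  | zero => exact pvG_append c x h
  | succ j ihj =>
    show min (pvPM (c ++ [x]) j) (pvG (c ++ [x]) (j+1)) = min (pvPM c j) (pvG c (j+1))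
    rw [ihj (by omega), pvG_append c x h]

theorem pvPM_append_last (c : List Int) (x : Int) (hc : c ≠ []) :
    pvPM (c ++ [x]) c.length = min (pvPM c (c.length - 1)) x := by
  obtain ⟨m, hm⟩ : ∃ m, c.length = m + 1 :=
    ⟨c.length - 1, by have := List.length_pos_of_ne_nil hc; omega⟩
  rw [hm]
  show min (pvPM (c ++ [x]) m) (pvG (c ++ [x]) (m+1)) = _
  rw [pvPM_append c x (by omega), show m + 1 = c.length from hm.symm, pvG_append_self,
     show c.length - 1 = m by omega]

-- characterization of B's scan
theorem pvScan_char (b : List Int) (hb : b ≠ []) :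
    b.foldl pvScan (none, []) =
      (some (pvPM b (b.length - 1)), (List.range b.length).map (pvPM b)) := by
  induction b using List.reverseRecOn with
  | nil => simp at hb
  | append_singleton c x ih =>
    by_cases hc : c = []
    · subst hc
      simp [pvScan, pvPM, pvG, List.range_one]
    · rw [List.foldl_append, ih hc]
      simp only [List.foldl_cons, List.foldl_nil]
      unfold pvScan
      dsimp only
      have hmin : (if x < pvPM c (c.length - 1) then x else pvPM c (c.length - 1)) =
          min (pvPM c (c.length - 1)) x := by
        split_ifs <;> omega
      rw [hmin]
      have hlen : (c ++ [x]).length = c.length + 1 := by simp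
      refine Prod.ext ?_ ?_
      · dsimp only
        rw [hlen]
        rw [show c.length + 1 - 1 = c.length from rfl, pvPM_append_last c x hc]
      · dsimp only
        rw [hlen, List.range_succ, List.map_append]
        congr 1
        · apply List.map_congr_left
          intro t ht
          rw [pvPM_append c x (List.mem_range.mp ht)]
        · rw [List.map_singleton, pvPM_append_last c x hc]

-- under Nodup, a position that is both a prefix- and a suffix-minimum is
-- exactly the (unique) position of the global minimum, i.e. pvM a (n-1)
theorem pvUniq (a : List Int) (hnd : a.Nodup) {j : Nat} (hj : j < a.length)
    (hP : pvG a j = pvPM a j) (hQ : pvG a j = pvPM a.reverse (a.length - 1 - j)) :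
    j = pvM a (a.length - 1) := by
  have hjM : j ≤ pvM a (a.length - 1) := pvM_max a (by omega) hP
  have hMle : pvM a (a.length - 1) ≤ a.length - 1 := pvM_le a _
  have h1 : pvPM a (a.length - 1) ≤ pvG a j := pvPM_le a (by omega)
  have h2 : pvG a (pvM a (a.length - 1)) = pvPM a (a.length - 1) := pvG_pvM a _
  have h3 : pvPM a.reverse (a.length - 1 - j) ≤
      pvG a.reverse (a.length - 1 - pvM a (a.length - 1)) := pvPM_le _ (by omega)
  have h4 : a.reverse.getD (a.length - 1 - pvM a (a.length - 1)) 0 =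
      a.getD (pvM a (a.length - 1)) 0 := pvGetD_reverse a (by omega)
  have heq : pvG a j = pvG a (pvM a (a.length - 1)) := by
    unfold pvG at *
    omega
  have hjh : j < a.length := hj
  have hMh : pvM a (a.length - 1) < a.length := by omega
  have heq' : a[j] = a[pvM a (a.length - 1)] := by
    have e1 : pvG a j = a[j] := List.getD_eq_getElem a 0 hjh
    have e2 : pvG a (pvM a (a.length - 1)) = a[pvM a (a.length - 1)] :=
      List.getD_eq_getElem a 0 hMh
    rw [← e1, ← e2, heq]
  exact (List.Nodup.getElem_inj_iff hnd).mp heq'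

-- ===== VERDICT (by name: the statement is the Claim_ definition above) =====
theorem solution_spec : Claim_equal_solution := by
  intro a _ hnd
  unfold Spec_solution
  rcases eq_or_ne a [] with rfl | hne
  · decide
  · have hn : 0 < a.length := List.length_pos_of_ne_nil hne
    have hrep : (List.replicate a.length (0:Int)).length = a.length := by simp
    have hL1 : (PySem.List.pyRange 1 ((a.length : Nat) : Int) 1).foldl (pvStep1 a)
        (List.replicate a.length 0, List.replicate a.length 0, 0) =
        (pvAdd (List.replicate a.length 0)
           (fun j => if j ≤ a.length - 1 ∧ ¬ pvPF a j then 1 else 0),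
         pvAdd (List.replicate a.length 0)
           (fun j => if j ≤ a.length - 1 ∧ pvPF a j ∧ j ≠ pvM a (a.length - 1) then 1 else 0),
         ((pvM a (a.length - 1) : Nat) : Int)) := by
      rw [show ((a.length : Nat) : Int) = ((a.length - 1 : Nat) : Int) + 1 by omega]
      exact pvLoop1_char a _ _ hrep hrep (a.length - 1) (by omega)
    unfold solution solution_alt
    simp only [PySem.List.len_eq]
    rw [show PySem.List.pyRepeat [(0:Int)] ((a.length : Nat) : Int) = List.replicate a.length 0 by
      rw [PySem.List.pyRepeat_singleton]; simp]
    rw [hL1]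
    dsimp only
    set A1 := pvAdd (List.replicate a.length (0:Int))
      (fun j => if j ≤ a.length - 1 ∧ ¬ pvPF a j then (1:Int) else 0) with hA1
    set A2 := pvAdd (List.replicate a.length (0:Int))
      (fun j => if j ≤ a.length - 1 ∧ pvPF a j ∧ j ≠ pvM a (a.length - 1) then (1:Int) else 0) with hA2
    have hA1len : A1.length = a.length := by rw [hA1, pvAdd_length]; exact hrep
    have hA2len : A2.length = a.length := by rw [hA2, pvAdd_length]; exact hrep
    have hbounds : ∀ i ∈ PySem.List.pyRange ((a.length : Int) - 2) (-1) (-1),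
        0 ≤ i ∧ i ≤ (a.length : Int) - 2 := by
      intro i hi
      rw [PySem.List.mem_pyRange_neg_one] at hi
      omega
    have hs2 := pvFoldCommute a _ hbounds (A1, A2, (a.length : Int) - 1) hA1len hA2len
      (by dsimp only; omega) (by dsimp only; omega)
    rw [pvRangeMap a.length] at hs2
    have hphiS : pvPhi a.length (A1, A2, (a.length : Int) - 1) = (A2.reverse, A1.reverse, 0) := by
      unfold pvPhi
      exact Prod.ext rfl (Prod.ext rfl (by ring))
    rw [hphiS] at hs2
    have hrevlen : a.reverse.length = a.length := List.length_reverse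
    have hL2 : (PySem.List.pyRange 1 ((a.length : Nat) : Int) 1).foldl (pvStep1 a.reverse)
        (A2.reverse, A1.reverse, 0) =
        (pvAdd A2.reverse (fun j => if j ≤ a.length - 1 ∧ ¬ pvPF a.reverse j then 1 else 0),
         pvAdd A1.reverse
           (fun j => if j ≤ a.length - 1 ∧ pvPF a.reverse j ∧ j ≠ pvM a.reverse (a.length - 1)
             then 1 else 0),
         ((pvM a.reverse (a.length - 1) : Nat) : Int)) := by
      rw [show ((a.length : Nat) : Int) = ((a.length - 1 : Nat) : Int) + 1 by omega]
      exact pvLoop1_char a.reverse A2.reverse A1.reverse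
        (by rw [List.length_reverse, hA2len, hrevlen])
        (by rw [List.length_reverse, hA1len, hrevlen])
        (a.length - 1) (by omega)
    rw [hL2] at hs2
    have hs2' : List.foldl (pvStep2 a) (A1, A2, (a.length : Int) - 1)
        (PySem.List.pyRange ((a.length : Int) - 2) (-1) (-1)) =
        pvPhi a.length
          (pvAdd A2.reverse (fun j => if j ≤ a.length - 1 ∧ ¬ pvPF a.reverse j then 1 else 0),
           pvAdd A1.reverse
             (fun j => if j ≤ a.length - 1 ∧ pvPF a.reverse j ∧ j ≠ pvM a.reverse (a.length - 1)
               then 1 else 0),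
           ((pvM a.reverse (a.length - 1) : Nat) : Int)) := by
      rw [← hs2, pvPhi_phi]
    rw [hs2']
    unfold pvPhi
    dsimp only
    rw [pvAdd_reverse A1, pvAdd_reverse A2]
    rw [hA1len, hA2len, hA1, hA2, pvAdd_comp, pvAdd_comp]
    -- B side
    rw [pvScan_char a hne, pvScan_char a.reverse (by simpa using hne)]
    dsimp only
    rw [PySem.List.slice?_none_none_neg_one]
    rw [Option.getD_some]
    rw [hrevlen]
    rw [List.foldl_map]
    rw [PySem.List.foldl_add, PySem.List.foldl_add]
    congr 1
    refine congrArg _ (List.map_congr_left ?_)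
    intro i hi
    rw [PySem.List.mem_pyRange_one] at hi
    obtain ⟨j, rfl⟩ : ∃ j : Nat, i = (j : Int) := ⟨i.toNat, (Int.toNat_of_nonneg hi.1).symm⟩
    have hj : j < a.length := by omega
    have hga : PySem.List.pyGetD a ((j : Nat) : Int) 0 = pvG a j := by
      simp [PySem.List.pyGetD_natCast, pvG]
    have hread : ∀ f : Nat → Int,
        PySem.List.pyGetD (pvAdd (List.replicate a.length (0:Int)) f) ((j : Nat) : Int) 0 = f j := by
      intro f
      rw [PySem.List.pyGetD_natCast, pvAdd_getD _ _ (by simpa using hj)]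
      simp [List.getD_eq_getElem?_getD, List.getElem?_replicate, hj]
    have hpm : ∀ t : Nat, t < a.length →
        PySem.List.pyGetD (List.map (pvPM a) (List.range a.length)) ((t : Nat) : Int) 0 = pvPM a t := by
      intro t ht
      rw [PySem.List.pyGetD_natCast]
      simp [List.getD_eq_getElem?_getD, List.getElem?_map, List.getElem?_range, ht]
    have hsm : ∀ t : Nat, t < a.length →
        PySem.List.pyGetD (List.map (pvPM a.reverse) (List.range a.length)).reverse ((t : Nat) : Int) 0 =
          pvPM a.reverse (a.length - 1 - t) := by
      intro t ht
      rw [PySem.List.pyGetD_natCast]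
      have hxs : (List.map (pvPM a.reverse) (List.range a.length)).length = a.length := by simp
      have h := pvGetD_reverse (List.map (pvPM a.reverse) (List.range a.length))
        (j := a.length - 1 - t) (by rw [hxs]; omega)
      rw [hxs, show a.length - 1 - (a.length - 1 - t) = t by omega] at h
      rw [h]
      simp [List.getD_eq_getElem?_getD, List.getElem?_map, List.getElem?_range,
        show a.length - 1 - t < a.length by omega]
    simp only [hread, hga, hpm j hj, hsm j hj]
    simp only [Bool.or_eq_true, Bool.not_eq_true', beq_eq_false_iff_ne, ne_eq]
    have hG : pvG a.reverse (a.length - 1 - j) = pvG a j := pvGetD_reverse a hj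
    refine if_congr ?_ rfl rfl
    have hG' : (pvG a.reverse (a.length - 1 - j) = pvPM a.reverse (a.length - 1 - j)) ↔
        (pvG a j = pvPM a.reverse (a.length - 1 - j)) := by rw [hG]
    have hMp : pvG a j = pvPM a j → pvG a j = pvPM a.reverse (a.length - 1 - j) →
        j = pvM a (a.length - 1) := pvUniq a hnd hj
    have hjle : j ≤ a.length - 1 := by omega
    clear hs2 hs2' hL1 hL2 hphiS hread hpm hsm hbounds hA1len hA2len hga hrep hi hn hne
    clear_value A1 A2
    clear hA1 hA2 A1 A2
    have htriv : a.length - 1 - j ≤ a.length - 1 := Nat.sub_le _ _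
    split_ifs <;> norm_num <;> tauto
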